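-- pv_equiv track=rewrite | github.com/Lcdemi/GCIS127-Practicum2 | practicum.py | phonetic_translation
-- ===== SOURCE A (Python) =====
-- PHONETIC_ALPHABET = ["Alpha", "Bravo", "Charlie", "Delta", "Echo", "Foxtrot",
--     "Golf", "Hotel", "India", "Juliett", "Kilo", "Lima", "Mike", "November",
--     "Oscar", "Papa", "Quebec", "Romeo", "Sierra", "Tango", "Uniform",
--     "Victor", "Whiskey", "X-ray", "Yankee", "Zulu"]
--
-- def phonetic_translation(String):
--     counter = 0
--     string_list = []
--     for char in String:
--         for word in PHONETIC_ALPHABET: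
--             if char.lower() == word[0].lower():
--                 string_list.insert(counter, word)
--         counter += 1
--     return string_list
-- ===== SOURCE B (Python) =====
-- PHONETIC_ALPHABET = ["Alpha", "Bravo", "Charlie", "Delta", "Echo", "Foxtrot",
--     "Golf", "Hotel", "India", "Juliett", "Kilo", "Lima", "Mike", "November",
--     "Oscar", "Papa", "Quebec", "Romeo", "Sierra", "Tango", "Uniform",
--     "Victor", "Whiskey", "X-ray", "Yankee", "Zulu"]
--
-- def phonetic_translation(String):
--     result = []
--     for char in String:
--         c = char.lower()
--         if len(c) == 1 and 'a' <= c <= 'z':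
--             result.append(PHONETIC_ALPHABET[ord(c) - ord('a')])
--     return result
-- ===== Notes on version B (the rewrite author's own statement) =====
-- stated objective: faster
-- what changed: Replaces the nested scan over all 26 alphabet words (with positional list.insert and a per-char counter) by a single pass that lowercases each char, guards it with a single-char lowercase-letter range check, and appends the word found by O(1) arithmetic indexing into the alphabet list.
import Mathlib
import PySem

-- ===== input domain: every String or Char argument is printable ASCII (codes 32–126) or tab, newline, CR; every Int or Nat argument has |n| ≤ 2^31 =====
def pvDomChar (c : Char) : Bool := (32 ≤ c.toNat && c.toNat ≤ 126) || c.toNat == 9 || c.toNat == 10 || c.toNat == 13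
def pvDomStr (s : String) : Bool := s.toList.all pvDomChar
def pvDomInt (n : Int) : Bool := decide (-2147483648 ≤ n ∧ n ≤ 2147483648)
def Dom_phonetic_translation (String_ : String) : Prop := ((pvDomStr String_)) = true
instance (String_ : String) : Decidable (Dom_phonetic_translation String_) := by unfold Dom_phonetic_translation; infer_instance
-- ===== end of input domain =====

-- B replaces A's nested 26-word scan (with positional insert and a counter) by a single
-- pass using O(1) arithmetic indexing after a single-char a..z range guard (objective: simpler).

-- ===== PORT A =====
def PHONETIC_ALPHABET : List String := ["Alpha", "Bravo", "Charlie", "Delta", "Echo", "Foxtrot",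
    "Golf", "Hotel", "India", "Juliett", "Kilo", "Lima", "Mike", "November",
    "Oscar", "Papa", "Quebec", "Romeo", "Sierra", "Tango", "Uniform",
    "Victor", "Whiskey", "X-ray", "Yankee", "Zulu"]

-- char.lower() == word[0].lower(): one-char strings are compared as List Char
def phonetic_translation (String_ : String) : List String :=
  (String_.toList.foldl
    (fun (st : Int × List String) char =>
      (st.1 + 1,
       PHONETIC_ALPHABET.foldl
         (fun sl word =>
           match PySem.List.pyGet? word.toList 0 with
           | none => sl  -- unreachable: every alphabet word is nonempty
           | some w0 =>
             if PySem.Chars.lower [char] = PySem.Chars.lower [w0]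
             then PySem.List.insert sl st.1 word else sl)
         st.2))
    ((0 : Int), ([] : List String))).2

-- ===== PORT B =====
-- c = char.lower(); if len(c) == 1 and 'a' <= c <= 'z': append PHONETIC_ALPHABET[ord(c)-ord('a')]
def phonetic_translation_alt (String_ : String) : List String :=
  String_.toList.foldl
    (fun acc char =>
      match PySem.Chars.lower [char] with
      | [c0] =>
        if 'a' ≤ c0 ∧ c0 ≤ 'z'
        then acc ++ [PySem.List.pyGetD PHONETIC_ALPHABET ((c0.toNat : Int) - 97) ""]
        else acc
      | _ => acc)
    []

-- ===== PRECONDITION & SPEC =====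
def Spec_phonetic_translation (String_ : String) (out : List String) : Prop := out = phonetic_translation_alt String_
instance (String_ : String) (out : List String) : Decidable (Spec_phonetic_translation String_ out) := by unfold Spec_phonetic_translation; infer_instance

-- ===== CLAIM (what is proved, stated in full; the proofs are below) =====
def Claim_equal_phonetic_translation : Prop := ∀ (String_ : String), Dom_phonetic_translation String_ → Spec_phonetic_translation String_ (phonetic_translation String_)

-- ===== LEMMAS AND PROOFS =====

-- A's inner-loop match test, as a Bool predicate on words
def pvPredA (char : Char) (word : String) : Bool :=
  match PySem.List.pyGet? word.toList 0 with
  | none => false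
  | some w0 => PySem.Chars.lower [char] == PySem.Chars.lower [w0]

-- B's per-char contribution
def pvMatchB (char : Char) : List String :=
  match PySem.Chars.lower [char] with
  | [c0] =>
    if 'a' ≤ c0 ∧ c0 ≤ 'z'
    then [PySem.List.pyGetD PHONETIC_ALPHABET ((c0.toNat : Int) - 97) ""]
    else []
  | _ => []

theorem pv_insert_ge {α : Type} (sl : List α) (i : Int) (h : (sl.length : Int) ≤ i) (v : α) :
    PySem.List.insert sl i v = sl ++ [v] := by
  have h0 : ¬ i < 0 := by omega
  simp only [PySem.List.insert, PySem.List.sliceIndices]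
  simp [h0, min_eq_right h]

-- the inner fold's step equals an if on pvPredA
theorem pv_innerstep (char : Char) (i : Int) (sl : List String) (word : String) :
    (match PySem.List.pyGet? word.toList 0 with
     | none => sl
     | some w0 =>
       if PySem.Chars.lower [char] = PySem.Chars.lower [w0]
       then PySem.List.insert sl i word else sl)
    = if pvPredA char word then PySem.List.insert sl i word else sl := by
  unfold pvPredA
  cases PySem.List.pyGet? word.toList 0 with
  | none => simp
  | some w0 => by_cases h : PySem.Chars.lower [char] = PySem.Chars.lower [w0] <;> simp [h]

theorem pv_inner_none (char : Char) (i : Int) (ws : List String) (sl : List String)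
    (h : ∀ w ∈ ws, pvPredA char w = false) :
    ws.foldl (fun sl word => if pvPredA char word then PySem.List.insert sl i word else sl) sl = sl := by
  induction ws generalizing sl with
  | nil => rfl
  | cons w ws ih =>
    simp only [List.foldl_cons, h w (by simp)]
    exact ih sl (fun w hw => h w (by simp [hw]))

theorem pv_inner (char : Char) (i : Int) (ws : List String) (sl : List String)
    (hlen : (sl.length : Int) ≤ i) (hfil : (ws.filter (pvPredA char)).length ≤ 1) :
    ws.foldl (fun sl word => if pvPredA char word then PySem.List.insert sl i word else sl) sl
    = sl ++ ws.filter (pvPredA char) := by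
  induction ws generalizing sl with
  | nil => simp
  | cons w ws ih =>
    by_cases h : pvPredA char w = true
    · have hrest : ∀ w' ∈ ws, pvPredA char w' = false := by
        intro w' hw'
        cases hb : pvPredA char w' with
        | false => rfl
        | true =>
          exfalso
          have h2 : w' ∈ ws.filter (pvPredA char) := List.mem_filter.mpr ⟨hw', hb⟩
          have h3 : 1 ≤ (ws.filter (pvPredA char)).length := List.length_pos_of_mem h2
          rw [List.filter_cons_of_pos h] at hfil
          simp only [List.length_cons] at hfil
          omega
      have hnil : ws.filter (pvPredA char) = [] :=
        List.filter_eq_nil_iff.mpr (fun w' hw' => by simp [hrest w' hw'])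
      simp only [List.foldl_cons, h, if_pos]
      rw [pv_insert_ge sl i hlen, pv_inner_none char i ws _ hrest]
      rw [List.filter_cons_of_pos h, hnil]
    · have hf : pvPredA char w = false := by
        cases hb : pvPredA char w with
        | false => rfl
        | true => exact absurd hb h
      simp only [List.foldl_cons, hf, Bool.false_eq_true, if_false]
      rw [List.filter_cons_of_neg (by simp [hf])] at hfil ⊢
      exact ih sl hlen hfil

-- per-char facts on the domain, checked over all 127 relevant code points
def pvCharOK (c : Char) : Bool :=
  ((PHONETIC_ALPHABET.filter (pvPredA c)).length ≤ 1 : Bool)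
    && (PHONETIC_ALPHABET.filter (pvPredA c) == pvMatchB c)

theorem pv_charOK_range : (List.range 127).all (fun n => pvCharOK (Char.ofNat n)) = true := by decide

theorem pv_charOK (c : Char) (h : pvDomChar c = true) : pvCharOK c = true := by
  have hlt : c.toNat < 127 := by
    simp [pvDomChar] at h
    omega
  have := List.all_eq_true.mp pv_charOK_range c.toNat (List.mem_range.mpr hlt)
  simpa [Char.ofNat_toNat] using this

theorem pv_outerA (l : List Char) (c : Int) (acc : List String)
    (hlen : (acc.length : Int) ≤ c) (hdom : ∀ ch ∈ l, pvDomChar ch = true) :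
    (l.foldl
      (fun (st : Int × List String) char =>
        (st.1 + 1,
         PHONETIC_ALPHABET.foldl
           (fun sl word =>
             match PySem.List.pyGet? word.toList 0 with
             | none => sl
             | some w0 =>
               if PySem.Chars.lower [char] = PySem.Chars.lower [w0]
               then PySem.List.insert sl st.1 word else sl)
           st.2))
      (c, acc)).2 = acc ++ l.flatMap pvMatchB := by
  induction l generalizing c acc with
  | nil => simp
  | cons ch l ih =>
    have hok := pv_charOK ch (hdom ch (by simp))
    simp only [pvCharOK, Bool.and_eq_true, decide_eq_true_eq, beq_iff_eq] at hok
    obtain ⟨hle, heq⟩ := hok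
    simp only [List.foldl_cons]
    have hstep : (PHONETIC_ALPHABET.foldl
        (fun sl word =>
          match PySem.List.pyGet? word.toList 0 with
          | none => sl
          | some w0 =>
            if PySem.Chars.lower [ch] = PySem.Chars.lower [w0]
            then PySem.List.insert sl c word else sl)
        acc) = acc ++ pvMatchB ch := by
      have : ∀ sl : List String, (PHONETIC_ALPHABET.foldl
          (fun sl word =>
            match PySem.List.pyGet? word.toList 0 with
            | none => sl
            | some w0 =>
              if PySem.Chars.lower [ch] = PySem.Chars.lower [w0]
              then PySem.List.insert sl c word else sl)
          sl) = PHONETIC_ALPHABET.foldl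
          (fun sl word => if pvPredA ch word then PySem.List.insert sl c word else sl) sl := by
        intro sl
        apply PySem.List.foldl_congr_mem
        intro a b hb
        exact pv_innerstep ch c a b
      rw [this acc, pv_inner ch c PHONETIC_ALPHABET acc hlen hle, heq]
    rw [hstep, ih (c + 1) (acc ++ pvMatchB ch)
      (by
        have hmb : (pvMatchB ch).length ≤ 1 := by rw [← heq]; exact hle
        simp only [List.length_append]
        push_cast
        omega)
      (fun ch' h' => hdom ch' (by simp [h']))]
    simp

theorem pv_outerB (l : List Char) (acc : List String) :
    l.foldl
      (fun acc char =>
        match PySem.Chars.lower [char] with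
        | [c0] =>
          if 'a' ≤ c0 ∧ c0 ≤ 'z'
          then acc ++ [PySem.List.pyGetD PHONETIC_ALPHABET ((c0.toNat : Int) - 97) ""]
          else acc
        | _ => acc)
      acc = acc ++ l.flatMap pvMatchB := by
  induction l generalizing acc with
  | nil => simp
  | cons ch l ih =>
    have hstep : (match PySem.Chars.lower [ch] with
        | [c0] =>
          if 'a' ≤ c0 ∧ c0 ≤ 'z'
          then acc ++ [PySem.List.pyGetD PHONETIC_ALPHABET ((c0.toNat : Int) - 97) ""]
          else acc
        | _ => acc) = acc ++ pvMatchB ch := by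
      unfold pvMatchB
      simp only [PySem.Chars.lower, List.map]
      by_cases h : 'a' ≤ PySem.Chars.lowerChar ch ∧ PySem.Chars.lowerChar ch ≤ 'z' <;> simp [h]
    simp only [List.foldl_cons, hstep, ih]
    simp

-- ===== VERDICT (by name: the statement is the Claim_ definition above) =====
theorem phonetic_translation_spec : Claim_equal_phonetic_translation := by
  intro String_ hdom
  unfold Spec_phonetic_translation phonetic_translation phonetic_translation_alt
  have hdom' : ∀ ch ∈ String_.toList, pvDomChar ch = true := by
    simpa [Dom_phonetic_translation, pvDomStr, List.all_eq_true] using hdom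
  rw [pv_outerA String_.toList 0 [] (by simp) hdom', pv_outerB String_.toList []]
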